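-- pv_equiv track=rewrite | github.com/kr-shrinivasa/DSA | 140_hack.py | hack
-- ===== SOURCE A (Python) =====
-- def hack(n):
--     if n==0:
--         return False
--     if n==1:
--         return True
--     if n%10==0 and n%20==0:
--         return hack(n//10) or hack(n//20)
--     elif n%10==0:
--         return hack(n//10)
--     elif n%20==0:
--         return hack(n//20)
--     else:
--         return False
-- ===== SOURCE B (Python) =====
-- def _strip(n, p):
--     c = 0
--     while n % p == 0:
--         n //= p
--         c += 1
--     return n, c
--
-- def hack(n):
--     if n < 1:
--         return False
--     m, x = _strip(n, 2)
--     m, y = _strip(m, 5)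
--     return m == 1 and y <= x <= 2 * y
-- ===== Notes on version B (the rewrite author's own statement) =====
-- stated objective: simpler
-- what changed: Replaces A's branching recursion (divide by ten / by twenty at each step) with stripping the factors two and five once and checking the closed-form condition y <= x <= twice y on the multiplicities x of two and y of five.
import Mathlib
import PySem

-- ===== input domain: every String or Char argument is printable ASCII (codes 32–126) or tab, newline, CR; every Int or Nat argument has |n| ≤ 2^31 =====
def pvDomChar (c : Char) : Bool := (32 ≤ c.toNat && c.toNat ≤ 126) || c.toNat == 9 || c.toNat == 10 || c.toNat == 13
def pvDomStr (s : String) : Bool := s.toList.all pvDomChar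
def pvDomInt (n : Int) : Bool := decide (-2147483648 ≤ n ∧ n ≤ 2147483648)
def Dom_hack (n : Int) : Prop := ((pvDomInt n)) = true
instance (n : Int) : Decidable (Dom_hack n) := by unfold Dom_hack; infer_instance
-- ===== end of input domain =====

-- B replaces A's branching recursion by stripping the factors 2 and 5 once and checking
-- the closed-form condition y ≤ x ≤ 2y on their multiplicities (objective: simpler).

-- termination helper, cited by both ports' decreasing_by
theorem pvFloordivNatAbsLt (n d : Int) (hd : 2 ≤ d) (h0 : n ≠ 0)
    (hm : PySem.Int.mod n d = 0) : (PySem.Int.floordiv n d).natAbs < n.natAbs := by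
  rw [PySem.Int.mod_eq_zero_iff_dvd] at hm
  obtain ⟨k, hk⟩ := hm
  rw [PySem.Int.floordiv_eq_ediv_of_pos (by omega), hk,
    Int.mul_ediv_cancel_left _ (by omega : d ≠ 0)]
  have hk0 : k ≠ 0 := by rintro rfl; simp at hk; omega
  have h1 : 1 ≤ k.natAbs := by omega
  have h2 : 2 ≤ d.natAbs := by omega
  have : (d * k).natAbs = d.natAbs * k.natAbs := Int.natAbs_mul d k
  rw [this]; nlinarith

-- ===== PORT A =====
def hack (n : Int) : Bool :=
  if n = 0 then false
  else if n = 1 then true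
  else if h1 : PySem.Int.mod n 10 = 0 ∧ PySem.Int.mod n 20 = 0 then
    hack (PySem.Int.floordiv n 10) || hack (PySem.Int.floordiv n 20)
  else if h2 : PySem.Int.mod n 10 = 0 then
    hack (PySem.Int.floordiv n 10)
  else if h3 : PySem.Int.mod n 20 = 0 then
    hack (PySem.Int.floordiv n 20)
  else false
termination_by n.natAbs
decreasing_by
  · exact pvFloordivNatAbsLt n 10 (by norm_num) (by assumption) h1.1
  · exact pvFloordivNatAbsLt n 20 (by norm_num) (by assumption) h1.2
  · exact pvFloordivNatAbsLt n 10 (by norm_num) (by assumption) h2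
  · exact pvFloordivNatAbsLt n 20 (by norm_num) (by assumption) h3

-- ===== PORT B =====
-- while-loop of _strip(n, p) with loop state (n, c); the '1 ≤ n ∧ 2 ≤ p' guard only
-- makes the recursion total (B only calls it with n ≥ 1 and p ∈ {2, 5})
def stripLoop (n p c : Int) : Int × Int :=
  if h : 1 ≤ n ∧ 2 ≤ p ∧ PySem.Int.mod n p = 0 then
    stripLoop (PySem.Int.floordiv n p) p (c + 1)
  else (n, c)
termination_by n.natAbs
decreasing_by
  exact pvFloordivNatAbsLt n p h.2.1 (by omega) h.2.2

def hack_alt (n : Int) : Bool :=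
  if n < 1 then false
  else
    match stripLoop n 2 0 with
    | (m1, x) =>
      match stripLoop m1 5 0 with
      | (m, y) => decide (m = 1) && (decide (y ≤ x) && decide (x ≤ 2 * y))

-- ===== PRECONDITION & SPEC =====
def Spec_hack (n : Int) (out : Bool) : Prop := out = hack_alt n
instance (n : Int) (out : Bool) : Decidable (Spec_hack n out) := by unfold Spec_hack; infer_instance

-- ===== CLAIM (what is proved, stated in full; the proofs are below) =====
def Claim_equal_hack : Prop := ∀ (n : Int), Dom_hack n → Spec_hack n (hack n)

-- ===== LEMMAS AND PROOFS =====

theorem strip_stop (n p c : Int) (h : ¬(1 ≤ n ∧ 2 ≤ p ∧ PySem.Int.mod n p = 0)) :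
    stripLoop n p c = (n, c) := by rw [stripLoop, dif_neg h]

theorem strip_stop_not_dvd (n p c : Int) (h : ¬ p ∣ n) : stripLoop n p c = (n, c) := by
  refine strip_stop n p c ?_
  rintro ⟨-, -, hm⟩
  exact h ((PySem.Int.mod_eq_zero_iff_dvd n p).mp hm)

theorem strip_step (n p c : Int) (h1 : 1 ≤ n) (hp : 2 ≤ p) (hd : p ∣ n) :
    stripLoop n p c = stripLoop (n / p) p (c + 1) := by
  rw [stripLoop, dif_pos ⟨h1, hp, (PySem.Int.mod_eq_zero_iff_dvd n p).mpr hd⟩,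
    PySem.Int.floordiv_eq_ediv_of_pos (by omega)]

theorem strip_shiftN : ∀ (N : Nat) (n p c : Int), n.natAbs < N →
    stripLoop n p c = ((stripLoop n p 0).1, c + (stripLoop n p 0).2) := by
  intro N
  induction N with
  | zero => intro n p c h; exact absurd h (Nat.not_lt_zero _)
  | succ N ih =>
    intro n p c hn
    by_cases h : 1 ≤ n ∧ 2 ≤ p ∧ PySem.Int.mod n p = 0
    · have hd := (PySem.Int.mod_eq_zero_iff_dvd n p).mp h.2.2
      have hlt : (n / p).natAbs < n.natAbs := by
        have := pvFloordivNatAbsLt n p h.2.1 (by omega) h.2.2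
        rwa [PySem.Int.floordiv_eq_ediv_of_pos (by omega)] at this
      rw [strip_step n p c h.1 h.2.1 hd, strip_step n p 0 h.1 h.2.1 hd,
        ih (n / p) p (c + 1) (by omega), ih (n / p) p (0 + 1) (by omega)]
      refine Prod.ext rfl ?_
      simp; omega
    · rw [strip_stop n p c h, strip_stop n p 0 h]; simp

theorem strip_shift (n p c : Int) :
    stripLoop n p c = ((stripLoop n p 0).1, c + (stripLoop n p 0).2) :=
  strip_shiftN (n.natAbs + 1) n p c (by omega)

theorem strip_sndN : ∀ (N : Nat) (n p c : Int), n.natAbs < N → c ≤ (stripLoop n p c).2 := by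
  intro N
  induction N with
  | zero => intro n p c h; exact absurd h (Nat.not_lt_zero _)
  | succ N ih =>
    intro n p c hn
    by_cases h : 1 ≤ n ∧ 2 ≤ p ∧ PySem.Int.mod n p = 0
    · have hd := (PySem.Int.mod_eq_zero_iff_dvd n p).mp h.2.2
      have hlt : (n / p).natAbs < n.natAbs := by
        have := pvFloordivNatAbsLt n p h.2.1 (by omega) h.2.2
        rwa [PySem.Int.floordiv_eq_ediv_of_pos (by omega)] at this
      rw [strip_step n p c h.1 h.2.1 hd]
      have := ih (n / p) p (c + 1) (by omega)
      omega
    · rw [strip_stop n p c h]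

theorem strip_snd_nonneg (n p : Int) : 0 ≤ (stripLoop n p 0).2 :=
  strip_sndN (n.natAbs + 1) n p 0 (by omega)

theorem strip_fstN : ∀ (N : Nat) (n p c : Int), n.natAbs < N → 1 ≤ n → 2 ≤ p →
    1 ≤ (stripLoop n p c).1 ∧ ¬ p ∣ (stripLoop n p c).1 := by
  intro N
  induction N with
  | zero => intro n p c h; exact absurd h (Nat.not_lt_zero _)
  | succ N ih =>
    intro n p c hn h1 hp
    by_cases h : 1 ≤ n ∧ 2 ≤ p ∧ PySem.Int.mod n p = 0
    · have hd := (PySem.Int.mod_eq_zero_iff_dvd n p).mp h.2.2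
      have hlt : (n / p).natAbs < n.natAbs := by
        have := pvFloordivNatAbsLt n p h.2.1 (by omega) h.2.2
        rwa [PySem.Int.floordiv_eq_ediv_of_pos (by omega)] at this
      have hq : 1 ≤ n / p := by
        obtain ⟨k, hk⟩ := hd
        rw [hk, Int.mul_ediv_cancel_left _ (by omega : p ≠ 0)]
        nlinarith [hk ▸ h1]
      rw [strip_step n p c h.1 h.2.1 hd]
      exact ih (n / p) p (c + 1) (by omega) hq hp
    · rw [strip_stop n p c h]
      refine ⟨h1, fun hd => h ⟨h1, hp, (PySem.Int.mod_eq_zero_iff_dvd n p).mpr hd⟩⟩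

-- stripping 2s commutes with multiplying by 5
theorem strip2_mul5N : ∀ (N : Nat) (k : Int), k.natAbs < N → 1 ≤ k →
    stripLoop (5 * k) 2 0 = (5 * (stripLoop k 2 0).1, (stripLoop k 2 0).2) := by
  intro N
  induction N with
  | zero => intro k h; exact absurd h (Nat.not_lt_zero _)
  | succ N ih =>
    intro k hk h1
    by_cases hd : (2 : Int) ∣ k
    · obtain ⟨m, hm⟩ := hd
      have hm1 : 1 ≤ m := by omega
      have h5k : (2 : Int) ∣ 5 * k := ⟨5 * m, by omega⟩
      have e1 : (5 * k) / 2 = 5 * m := by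
        rw [hm, show (5 : Int) * (2 * m) = 2 * (5 * m) by ring,
          Int.mul_ediv_cancel_left _ (by norm_num)]
      have e2 : k / 2 = m := by rw [hm, Int.mul_ediv_cancel_left _ (by norm_num)]
      rw [strip_step (5 * k) 2 0 (by omega) (by norm_num) h5k, e1,
        strip_step k 2 0 h1 (by norm_num) ⟨m, hm⟩, e2,
        strip_shift (5 * m) 2 (0 + 1), strip_shift m 2 (0 + 1),
        ih m (by omega) hm1]
    · have hd5 : ¬ (2 : Int) ∣ 5 * k := by
        intro h
        rcases Int.prime_two.dvd_mul.mp h with h5 | h2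
        · norm_num at h5
        · exact hd h2
      rw [strip_stop_not_dvd (5 * k) 2 0 hd5, strip_stop_not_dvd k 2 0 hd]

theorem strip2_mul5 (k : Int) (h1 : 1 ≤ k) :
    stripLoop (5 * k) 2 0 = (5 * (stripLoop k 2 0).1, (stripLoop k 2 0).2) :=
  strip2_mul5N (k.natAbs + 1) k (by omega) h1

-- a factor 5 of the odd part is a factor 5 of n
theorem strip2_dvd5N : ∀ (N : Nat) (n : Int), n.natAbs < N → 1 ≤ n →
    (5 : Int) ∣ (stripLoop n 2 0).1 → (5 : Int) ∣ n := by
  intro N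
  induction N with
  | zero => intro n h; exact absurd h (Nat.not_lt_zero _)
  | succ N ih =>
    intro n hn h1 hdvd
    by_cases hd : (2 : Int) ∣ n
    · obtain ⟨m, hm⟩ := hd
      have e2 : n / 2 = m := by rw [hm, Int.mul_ediv_cancel_left _ (by norm_num)]
      rw [strip_step n 2 0 h1 (by norm_num) ⟨m, hm⟩, e2, strip_shift m 2 (0 + 1)] at hdvd
      have : (5 : Int) ∣ m := ih m (by omega) (by omega) hdvd
      exact hm ▸ Dvd.dvd.mul_left this 2
    · rw [strip_stop_not_dvd n 2 0 hd] at hdvd; exact hdvd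

theorem strip2_dvd5 (n : Int) (h1 : 1 ≤ n) :
    (5 : Int) ∣ (stripLoop n 2 0).1 → (5 : Int) ∣ n :=
  strip2_dvd5N (n.natAbs + 1) n (by omega) h1

-- the X/Y/M recurrence for a factor 10
theorem strip_ten (k : Int) (h1 : 1 ≤ k) :
    stripLoop (10 * k) 2 0 = (5 * (stripLoop k 2 0).1, (stripLoop k 2 0).2 + 1) ∧
    stripLoop (5 * (stripLoop k 2 0).1) 5 0 =
      ((stripLoop (stripLoop k 2 0).1 5 0).1, (stripLoop (stripLoop k 2 0).1 5 0).2 + 1) := by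
  constructor
  · have h2 : (2 : Int) ∣ 10 * k := ⟨5 * k, by ring⟩
    have e1 : (10 * k) / 2 = 5 * k := by
      rw [show (10 : Int) * k = 2 * (5 * k) by ring, Int.mul_ediv_cancel_left _ (by norm_num)]
    rw [strip_step (10 * k) 2 0 (by omega) (by norm_num) h2, e1,
      strip_shift (5 * k) 2 (0 + 1), strip2_mul5 k h1]
    simp only [Prod.mk.injEq, true_and]
    omega
  · have hm1 : 1 ≤ (stripLoop k 2 0).1 := (strip_fstN (k.natAbs + 1) k 2 0 (by omega) h1 (by norm_num)).1
    have h5 : (5 : Int) ∣ 5 * (stripLoop k 2 0).1 := ⟨_, rfl⟩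
    have e5 : (5 * (stripLoop k 2 0).1) / 5 = (stripLoop k 2 0).1 :=
      Int.mul_ediv_cancel_left _ (by norm_num)
    rw [strip_step _ 5 0 (by omega) (by norm_num) h5, e5, strip_shift _ 5 (0 + 1)]
    simp only [Prod.mk.injEq, true_and]
    omega

-- hack_alt as an if-then-else on the stripped data, for rewriting
theorem hack_alt_eval (n m1 x m y : Int) (h1 : 1 ≤ n)
    (h2 : stripLoop n 2 0 = (m1, x)) (h5 : stripLoop m1 5 0 = (m, y)) :
    hack_alt n = (decide (m = 1) && (decide (y ≤ x) && decide (x ≤ 2 * y))) := by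
  rw [hack_alt, if_neg (by omega : ¬ n < 1), h2]
  simp only [h5]

theorem alt_ten (k : Int) (h1 : 1 ≤ k) :
    hack_alt (10 * k) =
      (decide ((stripLoop (stripLoop k 2 0).1 5 0).1 = 1) &&
       (decide ((stripLoop (stripLoop k 2 0).1 5 0).2 + 1 ≤ (stripLoop k 2 0).2 + 1) &&
        decide ((stripLoop k 2 0).2 + 1 ≤ 2 * ((stripLoop (stripLoop k 2 0).1 5 0).2 + 1)))) := by
  obtain ⟨e2, e5⟩ := strip_ten k h1
  exact hack_alt_eval (10 * k) (5 * (stripLoop k 2 0).1) ((stripLoop k 2 0).2 + 1)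
    (stripLoop (stripLoop k 2 0).1 5 0).1 ((stripLoop (stripLoop k 2 0).1 5 0).2 + 1)
    (by omega) (by rw [e2]) (by rw [e5])

theorem alt_two (j : Int) (h1 : 1 ≤ j) :
    stripLoop (2 * j) 2 0 = ((stripLoop j 2 0).1, (stripLoop j 2 0).2 + 1) := by
  have e1 : (2 * j) / 2 = j := Int.mul_ediv_cancel_left _ (by norm_num)
  rw [strip_step (2 * j) 2 0 (by omega) (by norm_num) ⟨j, rfl⟩, e1, strip_shift j 2 (0 + 1)]
  simp; omega

-- A's three recursive cases, phrased about hack_alt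
theorem alt_case20 (j : Int) (h1 : 1 ≤ j) :
    hack_alt (20 * j) = (hack_alt (2 * j) || hack_alt j) := by
  have hX0 : 0 ≤ (stripLoop j 2 0).2 := strip_snd_nonneg j 2
  have hY0 : 0 ≤ (stripLoop (stripLoop j 2 0).1 5 0).2 := strip_snd_nonneg _ 5
  have e20 : (20 : Int) * j = 10 * (2 * j) := by ring
  have hA := alt_ten (2 * j) (by omega)
  rw [alt_two j h1] at hA
  dsimp only at hA
  have hD := hack_alt_eval (2 * j) (stripLoop j 2 0).1 ((stripLoop j 2 0).2 + 1)
    (stripLoop (stripLoop j 2 0).1 5 0).1 (stripLoop (stripLoop j 2 0).1 5 0).2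
    (by omega) (alt_two j h1) rfl
  have hC : hack_alt j =
      (decide ((stripLoop (stripLoop j 2 0).1 5 0).1 = 1) &&
       (decide ((stripLoop (stripLoop j 2 0).1 5 0).2 ≤ (stripLoop j 2 0).2) &&
        decide ((stripLoop j 2 0).2 ≤ 2 * (stripLoop (stripLoop j 2 0).1 5 0).2))) :=
    hack_alt_eval j _ _ _ _ h1 rfl rfl
  rw [e20, hA, hD, hC]
  rw [Bool.eq_iff_iff]
  simp only [Bool.or_eq_true, Bool.and_eq_true, decide_eq_true_eq]
  omega

theorem alt_case10 (k : Int) (h1 : 1 ≤ k) (hodd : ¬ (2 : Int) ∣ k) :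
    hack_alt (10 * k) = hack_alt k := by
  have hY0 : 0 ≤ (stripLoop (stripLoop k 2 0).1 5 0).2 := strip_snd_nonneg _ 5
  have hX : stripLoop k 2 0 = (k, 0) := strip_stop_not_dvd k 2 0 hodd
  have hC : hack_alt k =
      (decide ((stripLoop (stripLoop k 2 0).1 5 0).1 = 1) &&
       (decide ((stripLoop (stripLoop k 2 0).1 5 0).2 ≤ (stripLoop k 2 0).2) &&
        decide ((stripLoop k 2 0).2 ≤ 2 * (stripLoop (stripLoop k 2 0).1 5 0).2))) :=
    hack_alt_eval k _ _ _ _ h1 rfl rfl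
  rw [alt_ten k h1, hC, hX]
  rw [Bool.eq_iff_iff]
  simp only [Bool.and_eq_true, decide_eq_true_eq]
  omega

theorem alt_case_none (n : Int) (h2 : 2 ≤ n) (h10 : ¬ (10 : Int) ∣ n) :
    hack_alt n = false := by
  have hC : hack_alt n =
      (decide ((stripLoop (stripLoop n 2 0).1 5 0).1 = 1) &&
       (decide ((stripLoop (stripLoop n 2 0).1 5 0).2 ≤ (stripLoop n 2 0).2) &&
        decide ((stripLoop n 2 0).2 ≤ 2 * (stripLoop (stripLoop n 2 0).1 5 0).2))) :=
    hack_alt_eval n _ _ _ _ (by omega) rfl rfl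
  rw [hC]
  by_contra hcon
  rw [Bool.not_eq_false] at hcon
  simp only [Bool.and_eq_true, decide_eq_true_eq] at hcon
  obtain ⟨hM, hYX, hX2Y⟩ := hcon
  have hX0 : 0 ≤ (stripLoop n 2 0).2 := strip_snd_nonneg n 2
  have hY0 : 0 ≤ (stripLoop (stripLoop n 2 0).1 5 0).2 := strip_snd_nonneg _ 5
  have hm1 : 1 ≤ (stripLoop n 2 0).1 :=
    (strip_fstN (n.natAbs + 1) n 2 0 (by omega) (by omega) (by norm_num)).1
  by_cases hd2 : (2 : Int) ∣ n
  · -- then 5 ∤ n, so 5 ∤ odd part, so y = 0, but x ≥ 1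
    have hd5 : ¬ (5 : Int) ∣ n := fun h5 => h10 (by
      obtain ⟨a, ha⟩ := hd2; obtain ⟨b, hb⟩ := h5; omega)
    have hne5 : ¬ (5 : Int) ∣ (stripLoop n 2 0).1 := fun h => hd5 (strip2_dvd5 n (by omega) h)
    have hY : stripLoop (stripLoop n 2 0).1 5 0 = ((stripLoop n 2 0).1, 0) :=
      strip_stop_not_dvd _ 5 0 hne5
    rw [hY] at hX2Y
    dsimp only at hX2Y
    obtain ⟨m, hm⟩ := hd2
    have e2 : n / 2 = m := by rw [hm, Int.mul_ediv_cancel_left _ (by norm_num)]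
    have hX1 : 1 ≤ (stripLoop n 2 0).2 := by
      rw [strip_step n 2 0 (by omega) (by norm_num) ⟨m, hm⟩, e2, strip_shift m 2 (0 + 1)]
      have := strip_snd_nonneg m 2
      dsimp only
      omega
    omega
  · -- 2 ∤ n: x = 0, so y = 0 and m = n ≥ 2, contradiction with m = 1
    have hX : stripLoop n 2 0 = (n, 0) := strip_stop_not_dvd n 2 0 hd2
    rw [hX] at hYX hX2Y hM
    dsimp only at hYX hX2Y hM
    have hY0' : 0 ≤ (stripLoop n 5 0).2 := strip_snd_nonneg n 5
    by_cases hd5 : (5 : Int) ∣ n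
    · obtain ⟨m, hm⟩ := hd5
      have e5 : n / 5 = m := by rw [hm, Int.mul_ediv_cancel_left _ (by norm_num)]
      have : 1 ≤ (stripLoop n 5 0).2 := by
        rw [strip_step n 5 0 (by omega) (by norm_num) ⟨m, hm⟩, e5, strip_shift m 5 (0 + 1)]
        have := strip_snd_nonneg m 5
        dsimp only
        omega
      omega
    · have h5 : stripLoop n 5 0 = (n, 0) := strip_stop_not_dvd n 5 0 hd5
      rw [h5] at hM
      dsimp only at hM
      omega

-- hack is false on nonpositive inputs
theorem hack_nonposN : ∀ (N : Nat) (n : Int), n.natAbs < N → n ≤ 0 → hack n = false := by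
  intro N
  induction N with
  | zero => intro n h; exact absurd h (Nat.not_lt_zero _)
  | succ N ih =>
    intro n hn h0
    rw [hack]
    by_cases hz : n = 0
    · simp [hz]
    rw [if_neg hz, if_neg (by omega : ¬ n = 1)]
    have hneg : n < 0 := by omega
    have hrec : ∀ d : Int, 2 ≤ d → PySem.Int.mod n d = 0 → hack (PySem.Int.floordiv n d) = false := by
      intro d hd hm
      have hlt := pvFloordivNatAbsLt n d hd hz hm
      have hdd := (PySem.Int.mod_eq_zero_iff_dvd n d).mp hm
      obtain ⟨k, hk⟩ := hdd
      have hfe : PySem.Int.floordiv n d = k := by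
        rw [PySem.Int.floordiv_eq_ediv_of_pos (by omega), hk,
          Int.mul_ediv_cancel_left _ (by omega : d ≠ 0)]
      have hk0 : k ≤ 0 := by nlinarith
      exact ih _ (by omega) (hfe ▸ hk0)
    split_ifs with c1 c2 c3
    · rw [hrec 10 (by norm_num) c1.1, hrec 20 (by norm_num) c1.2]; rfl
    · exact hrec 10 (by norm_num) c2
    · exact hrec 20 (by norm_num) c3
    · rfl

-- main equivalence by strong induction on |n|
theorem hack_eq_altN : ∀ (N : Nat) (n : Int), n.natAbs < N → hack n = hack_alt n := by
  intro N
  induction N with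
  | zero => intro n h; exact absurd h (Nat.not_lt_zero _)
  | succ N ih =>
    intro n hn
    rcases le_or_gt n 0 with h0 | h0
    · rw [hack_nonposN (n.natAbs + 1) n (by omega) h0, hack_alt, if_pos (by omega)]
    rcases eq_or_lt_of_le (by omega : (1 : Int) ≤ n) with h1 | h1
    · have s2 : stripLoop 1 2 0 = (1, 0) := strip_stop_not_dvd 1 2 0 (by norm_num)
      have s5 : stripLoop 1 5 0 = (1, 0) := strip_stop_not_dvd 1 5 0 (by norm_num)
      rw [← h1, hack, hack_alt_eval 1 1 0 1 0 (by norm_num) s2 s5]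
      norm_num
    -- n ≥ 2
    have hm10 : PySem.Int.mod n 10 = 0 ↔ (10 : Int) ∣ n := PySem.Int.mod_eq_zero_iff_dvd n 10
    have hm20 : PySem.Int.mod n 20 = 0 ↔ (20 : Int) ∣ n := PySem.Int.mod_eq_zero_iff_dvd n 20
    rw [hack, if_neg (by omega : ¬ n = 0), if_neg (by omega : ¬ n = 1)]
    by_cases h20 : (20 : Int) ∣ n
    · obtain ⟨j, hj⟩ := h20
      have hj1 : 1 ≤ j := by omega
      have h10 : (10 : Int) ∣ n := ⟨2 * j, by omega⟩
      rw [dif_pos ⟨hm10.mpr h10, hm20.mpr ⟨j, hj⟩⟩]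
      have e10 : PySem.Int.floordiv n 10 = 2 * j := by
        rw [PySem.Int.floordiv_eq_ediv_of_pos (by norm_num), hj,
          show (20 : Int) * j = 10 * (2 * j) by ring, Int.mul_ediv_cancel_left _ (by norm_num)]
      have e20 : PySem.Int.floordiv n 20 = j := by
        rw [PySem.Int.floordiv_eq_ediv_of_pos (by norm_num), hj,
          Int.mul_ediv_cancel_left _ (by norm_num)]
      rw [e10, e20, ih (2 * j) (by omega), ih j (by omega), hj, alt_case20 j hj1]
    by_cases h10 : (10 : Int) ∣ n
    · obtain ⟨k, hk⟩ := h10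
      have hk1 : 1 ≤ k := by omega
      have hkodd : ¬ (2 : Int) ∣ k := fun ⟨m, hm⟩ => h20 ⟨m, by omega⟩
      rw [dif_neg (fun hc => h20 (hm20.mp hc.2)), dif_pos (hm10.mpr ⟨k, hk⟩)]
      have e10 : PySem.Int.floordiv n 10 = k := by
        rw [PySem.Int.floordiv_eq_ediv_of_pos (by norm_num), hk,
          Int.mul_ediv_cancel_left _ (by norm_num)]
      rw [e10, ih k (by omega), hk, alt_case10 k hk1 hkodd]
    · rw [dif_neg (fun hc => h10 (hm10.mp hc.1)), dif_neg (fun hc => h10 (hm10.mp hc)),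
        dif_neg (fun hc => h20 (hm20.mp hc)), alt_case_none n (by omega) h10]

-- ===== VERDICT (by name: the statement is the Claim_ definition above) =====
theorem hack_spec : Claim_equal_hack := by
  intro n _
  unfold Spec_hack
  exact hack_eq_altN (n.natAbs + 1) n (by omega)
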